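-- pv_equiv track=rewrite | github.com/voidsatisfaction/TIL | Algorithm/[leetcode]nice_problems/pointer/76_hard_[]_minimum_window_substring.py | _getStringIndexLists
-- ===== SOURCE A (Python) =====
-- from typing import List, Dict
--
-- def _getStringIndexLists(s: str, t: str) -> (List[List[int]], List[int]):
--   hashMap = {}
--   hashMapSync = []
--   i = 0
--   stringIndex = []
--
--   for c in t:
--     if hashMap.get(c) is None:
--       hashMap[c] = { "index": i, "num": 1 }
--       hashMapSync.append(c)
--       stringIndex.append([])
--       i += 1
--     else:
--       hashMap[c]["num"] += 1
--
--   j = 0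
--   for c in s:
--     if hashMap.get(c) is not None:
--       index = hashMap.get(c).get("index")
--       stringIndex[index].append(j)
--     j += 1
--
--   targetCharacterNums = [ hashMap.get(c).get("num") for c in hashMapSync ]
--
--   return stringIndex, targetCharacterNums
-- ===== SOURCE B (Python) =====
-- def _getStringIndexLists(s: str, t: str):
--   order = list(dict.fromkeys(t))
--   stringIndex = [[j for j, ch in enumerate(s) if ch == c] for c in order]
--   targetCharacterNums = [t.count(c) for c in order]
--   return stringIndex, targetCharacterNums
-- ===== Notes on version B (the rewrite author's own statement) =====
-- stated objective: simpler
-- what changed: A builds a char->(index,count) dict plus parallel sync/index lists in one pass over t and then distributes positions of s into slots by stored integer index in a second indexed pass; B computes the first-appearance order of t's characters (dict.fromkeys) and then, per distinct character, scans s once with enumerate to collect its positions and counts it in t directly.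
import Mathlib
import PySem

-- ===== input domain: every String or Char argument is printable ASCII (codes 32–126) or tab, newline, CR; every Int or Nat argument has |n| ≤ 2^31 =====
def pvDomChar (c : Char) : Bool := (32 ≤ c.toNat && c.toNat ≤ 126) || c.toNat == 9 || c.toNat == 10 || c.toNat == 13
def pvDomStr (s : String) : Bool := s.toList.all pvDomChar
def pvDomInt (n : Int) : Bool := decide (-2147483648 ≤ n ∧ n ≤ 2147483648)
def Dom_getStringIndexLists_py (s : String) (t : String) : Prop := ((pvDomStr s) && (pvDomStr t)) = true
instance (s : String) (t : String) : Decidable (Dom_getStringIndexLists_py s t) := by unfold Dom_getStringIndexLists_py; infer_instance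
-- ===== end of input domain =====

-- B replaces A's single indexed distribution pass over s by one per-character scan of s
-- for each distinct character of t (objective: simpler).

-- ===== PORT A =====
-- hashMap values {"index": i, "num": n} are ported as the pair (index, num).
def aLoop1 : List Char → PySem.Dict Char (Int × Int) → List Char → Int → List (List Int) →
    PySem.Dict Char (Int × Int) × List Char × Int × List (List Int)
  | [], h, sync, i, si => (h, sync, i, si)
  | c :: rest, h, sync, i, si =>
    match h.get? c with
    | none => aLoop1 rest (h.insert c (i, 1)) (sync ++ [c]) (i + 1) (si ++ [[]])
    | some v => aLoop1 rest (h.insert c (v.1, v.2 + 1)) sync i si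

-- The stored index is always a valid nonnegative position of stringIndex, so `.toNat` +
-- `List.modify` is exactly Python's `stringIndex[index].append(j)` here.
def aLoop2 : List Char → Int → PySem.Dict Char (Int × Int) → List (List Int) → List (List Int)
  | [], _, _, si => si
  | c :: rest, j, h, si =>
    match h.get? c with
    | some v => aLoop2 rest (j + 1) h (si.modify v.1.toNat (· ++ [j]))
    | none => aLoop2 rest (j + 1) h si

def getStringIndexLists_py (s : String) (t : String) : List (List Int) × List Int :=
  let st := aLoop1 t.toList PySem.Dict.empty [] 0 []
  let si := aLoop2 s.toList 0 st.1 st.2.2.2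
  -- hashMap.get(c).get("num") for c in hashMapSync: c is always a key, the getD 0 arm is unreachable
  (si, st.2.1.map (fun c => ((st.1.get? c).map (·.2)).getD 0))

-- ===== PORT B =====
def getStringIndexLists_py_alt (s : String) (t : String) : List (List Int) × List Int :=
  let order := PySem.List.dedup t.toList   -- list(dict.fromkeys(t))
  (order.map (fun c => (PySem.List.enumerate s.toList 0).filterMap
      (fun p => if p.2 = c then some p.1 else none)),
   order.map (fun c => (PySem.Str.count t (String.ofList [c]) : Int)))

-- ===== PRECONDITION & SPEC =====
def Spec_getStringIndexLists_py (s : String) (t : String) (out : List (List Int) × List Int) : Prop := out = getStringIndexLists_py_alt s t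
instance (s : String) (t : String) (out : List (List Int) × List Int) : Decidable (Spec_getStringIndexLists_py s t out) := by unfold Spec_getStringIndexLists_py; infer_instance

-- ===== CLAIM (what is proved, stated in full; the proofs are below) =====
def Claim_equal_getStringIndexLists_py : Prop := ∀ (s : String) (t : String), Dom_getStringIndexLists_py s t → Spec_getStringIndexLists_py s t (getStringIndexLists_py s t)

-- ===== LEMMAS AND PROOFS =====

-- occurrence positions of c in l, numbered from j (what A's second loop appends for c)
def posOf : List Char → Int → Char → List Int
  | [], _, _ => []
  | d :: rest, j, c => (if d = c then [j] else []) ++ posOf rest (j + 1) c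

theorem go_single (c : Char) : ∀ (l : List Char) (fuel k : Nat), l.length ≤ fuel →
    PySem.Chars.count.go [c] fuel l k = k + l.count c := by
  intro l
  induction l with
  | nil => intro fuel k h; cases fuel <;> simp [PySem.Chars.count.go]
  | cons a rest ih =>
    intro fuel k h
    cases fuel with
    | zero => simp at h
    | succ f =>
      simp only [PySem.Chars.count.go]
      by_cases hc : c = a
      · subst hc
        simp only [List.isPrefixOf, BEq.rfl, Bool.and_true, if_true, List.length_cons,
          List.length_nil, Nat.zero_add, List.drop_succ_cons, List.drop_zero]
        rw [ih f (k + 1) (by simpa using h)]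
        simp
        omega
      · have hp : List.isPrefixOf [c] (a :: rest) = false := by
          simp [List.isPrefixOf]
          exact hc
        rw [hp]
        simp only [Bool.false_eq_true, if_false]
        rw [ih f k (by simpa using h)]
        simp [Ne.symm hc]

theorem count_single (t : String) (c : Char) :
    PySem.Str.count t (String.ofList [c]) = t.toList.count c := by
  rw [PySem.Str.count_eq]
  have h1 : (String.ofList [c]).toList = [c] := by simp
  rw [h1, PySem.Chars.count]
  simp only [List.isEmpty_cons]
  simpa using go_single c t.toList t.toList.length 0 le_rfl

theorem posOf_eq_filterMap (c : Char) : ∀ (l : List Char) (j : Int),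
    (PySem.List.enumerate l j).filterMap (fun p => if p.2 = c then some p.1 else none) =
      posOf l j c := by
  intro l
  induction l with
  | nil => intro j; simp [PySem.List.enumerate_nil, posOf]
  | cons a rest ih =>
    intro j
    rw [PySem.List.enumerate_cons, List.filterMap_cons]
    by_cases h : a = c <;> simp [posOf, h, ih]

theorem modify_map_idxOf {c : Char} (f : List Int → List Int) :
    ∀ (sync : List Char) (g : Char → List Int), sync.Nodup → c ∈ sync →
    (sync.map g).modify (sync.idxOf c) f =
      sync.map (fun c' => if c' = c then f (g c') else g c') := by
  intro sync
  induction sync with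
  | nil => intro g _ hc; simp at hc
  | cons a rest ih =>
    intro g hnd hc
    by_cases ha : a = c
    · subst ha
      have hnotin : a ∉ rest := (List.nodup_cons.mp hnd).1
      have hmap : rest.map (fun c' => if c' = a then f (g c') else g c') = rest.map g := by
        apply List.map_congr_left
        intro c' hc'
        have h2 : c' ≠ a := fun hh => hnotin (hh ▸ hc')
        simp [h2]
      simp [List.idxOf_cons_self, List.modify_zero_cons, hmap]
    · have hcr : c ∈ rest := by cases hc with
        | head => exact absurd rfl ha
        | tail _ h => exact h
      have hidx : (a :: rest).idxOf c = rest.idxOf c + 1 := by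
        simp [ha]
      rw [hidx, List.map_cons, List.modify_succ_cons]
      rw [ih g hnd.of_cons hcr]
      simp [ha]

theorem loop2_spec (num : Char → Int) :
    ∀ (l : List Char) (j : Int) (h : PySem.Dict Char (Int × Int)) (sync : List Char)
      (g : Char → List Int), sync.Nodup →
    (∀ c, h.get? c = if c ∈ sync then some ((sync.idxOf c : Int), num c) else none) →
    aLoop2 l j h (sync.map g) = sync.map (fun c => g c ++ posOf l j c) := by
  intro l
  induction l with
  | nil => intro j h sync g _ _; simp [aLoop2, posOf]
  | cons a rest ih =>
    intro j h sync g hnd hget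
    by_cases ha : a ∈ sync
    · rw [show aLoop2 (a :: rest) j h (sync.map g) =
          aLoop2 rest (j + 1) h ((sync.map g).modify ((sync.idxOf a : Int)).toNat (· ++ [j]))
        from by rw [aLoop2, hget a]; simp [ha]]
      rw [Int.toNat_natCast, modify_map_idxOf _ sync g hnd ha,
        ih (j + 1) h sync (fun c' => if c' = a then g c' ++ [j] else g c') hnd hget]
      apply List.map_congr_left
      intro c hcm
      by_cases hca : c = a
      · subst hca; simp [posOf, List.append_assoc]
      · have h2 : a ≠ c := fun hh => hca hh.symm
        simp [hca, posOf, h2]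
    · rw [show aLoop2 (a :: rest) j h (sync.map g) = aLoop2 rest (j + 1) h (sync.map g)
        from by rw [aLoop2, hget a]; simp [ha]]
      rw [ih (j + 1) h sync g hnd hget]
      apply List.map_congr_left
      intro c hcm
      have h2 : a ≠ c := fun hh => ha (hh ▸ hcm)
      simp [posOf, h2]

theorem loop1_spec :
    ∀ (l p : List Char) (h : PySem.Dict Char (Int × Int)) (sync : List Char)
      (si : List (List Int)),
    (∀ c, h.get? c = if c ∈ sync then some ((sync.idxOf c : Int), (p.count c : Int)) else none) →
    sync = PySem.List.dedup p →
    si = sync.map (fun _ => ([] : List Int)) →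
    (aLoop1 l h sync (sync.length : Int) si).2.1 = PySem.List.dedup (p ++ l) ∧
    (∀ c, (aLoop1 l h sync (sync.length : Int) si).1.get? c =
      if c ∈ PySem.List.dedup (p ++ l)
      then some (((PySem.List.dedup (p ++ l)).idxOf c : Int), ((p ++ l).count c : Int))
      else none) ∧
    (aLoop1 l h sync (sync.length : Int) si).2.2.2 =
      (PySem.List.dedup (p ++ l)).map (fun _ => ([] : List Int)) := by
  intro l
  induction l with
  | nil =>
    intro p h sync si hget hsync hsi
    simp only [aLoop1, List.append_nil]
    refine ⟨hsync, ?_, ?_⟩ <;> rw [← hsync]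
    · exact hget
    · exact hsi
  | cons c rest ih =>
    intro p h sync si hget hsync hsi
    have hded : PySem.List.dedup (p ++ [c]) =
        if c ∈ p then PySem.List.dedup p else PySem.List.dedup p ++ [c] := by
      simp only [PySem.List.dedup_eq_ofList, PySem.Set.ofList_eq_foldl, List.foldl_append,
        List.foldl_cons, List.foldl_nil]
      rw [show PySem.Set.add (List.foldl PySem.Set.add [] p) c =
          if c ∈ List.foldl PySem.Set.add [] p then List.foldl PySem.Set.add [] p
          else List.foldl PySem.Set.add [] p ++ [c] from by
        simp [PySem.Set.add, PySem.Set.contains]]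
      have : c ∈ List.foldl PySem.Set.add [] p ↔ c ∈ p := by
        rw [← PySem.Set.ofList_eq_foldl]; exact PySem.Set.mem_ofList _ _
      simp only [← PySem.Set.ofList_eq_foldl]
      by_cases hcp : c ∈ p <;> simp [hcp]
    have hmem : c ∈ sync ↔ c ∈ p := by
      rw [hsync, PySem.List.dedup_eq_ofList]; exact PySem.Set.mem_ofList _ _
    by_cases hcs : c ∈ sync
    · -- repeat character: bump the count
      have hcp : c ∈ p := hmem.mp hcs
      rw [show aLoop1 (c :: rest) h sync (sync.length : Int) si =
          aLoop1 rest (h.insert c ((sync.idxOf c : Int), (p.count c : Int) + 1)) sync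
            (sync.length : Int) si
        from by rw [aLoop1, hget c]; simp [hcs]]
      have hget' : ∀ c', (h.insert c ((sync.idxOf c : Int), (p.count c : Int) + 1)).get? c' =
          if c' ∈ sync then some ((sync.idxOf c' : Int), ((p ++ [c]).count c' : Int)) else none := by
        intro c'
        by_cases hc' : c' = c
        · subst hc'
          rw [PySem.Dict.get?_insert_self]
          simp [hcs, List.count_append]
        · rw [PySem.Dict.get?_insert_of_ne _ _ hc', hget c']
          have hz : List.count c' [c] = 0 := List.count_eq_zero.mpr (by simp [hc'])
          simp [List.count_append, hz]
      have := ih (p ++ [c]) _ sync si hget' (by rw [hsync, hded]; simp only [hcp, if_true]) hsi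
      simpa [List.append_assoc] using this
    · -- new character
      have hcp : c ∉ p := fun hh => hcs (hmem.mpr hh)
      rw [show aLoop1 (c :: rest) h sync (sync.length : Int) si =
          aLoop1 rest (h.insert c ((sync.length : Int), 1)) (sync ++ [c])
            ((sync.length : Int) + 1) (si ++ [[]])
        from by rw [aLoop1, hget c]; simp [hcs]]
      have hlen : ((sync.length : Int) + 1) = (((sync ++ [c]).length : Nat) : Int) := by
        simp
      rw [hlen]
      have hget' : ∀ c', (h.insert c ((sync.length : Int), 1)).get? c' =
          if c' ∈ sync ++ [c]
          then some (((sync ++ [c]).idxOf c' : Int), ((p ++ [c]).count c' : Int)) else none := by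
        intro c'
        by_cases hc' : c' = c
        · subst hc'
          rw [PySem.Dict.get?_insert_self]
          have h1 : (sync ++ [c']).idxOf c' = sync.length := by
            simp [List.idxOf_append, hcs]
          have h2 : p.count c' = 0 := List.count_eq_zero.mpr hcp
          simp [h1, List.count_append, h2]
        · rw [PySem.Dict.get?_insert_of_ne _ _ hc', hget c']
          by_cases hm : c' ∈ sync
          · rw [List.idxOf_append_of_mem hm]
            have hz : List.count c' [c] = 0 := List.count_eq_zero.mpr (by simp [hc'])
            simp [hm, List.count_append, hz]
          · have : c' ∉ sync ++ [c] := by simp [hm, hc']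
            simp [hm, this]
      have := ih (p ++ [c]) _ (sync ++ [c]) (si ++ [[]]) hget'
        (by rw [hded]; simp [hcp, hsync]) (by simp [hsi])
      simpa [List.append_assoc] using this

theorem nodup_dedup_chars (l : List Char) : (PySem.List.dedup l).Nodup :=
  PySem.List.nodup_dedup l

-- ===== VERDICT (by name: the statement is the Claim_ definition above) =====
theorem getStringIndexLists_py_spec : Claim_equal_getStringIndexLists_py := by
  intro s t _
  unfold Spec_getStringIndexLists_py getStringIndexLists_py getStringIndexLists_py_alt
  have hget0 : ∀ c : Char, (PySem.Dict.empty : PySem.Dict Char (Int × Int)).get? c =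
      if c ∈ ([] : List Char) then some ((([] : List Char).idxOf c : Int), (([] : List Char).count c : Int)) else none := by
    intro c; simp [PySem.Dict.empty, PySem.Dict.get?]
  have h1 := loop1_spec t.toList [] PySem.Dict.empty [] [] hget0 (by simp [PySem.List.dedup]) rfl
  simp only [List.nil_append] at h1
  obtain ⟨hsync, hget, hsi⟩ := h1
  simp only [List.length_nil, Nat.cast_zero] at hsync hget hsi
  set st := aLoop1 t.toList PySem.Dict.empty [] 0 [] with hst
  set order := PySem.List.dedup t.toList with horder
  have h2 : aLoop2 s.toList 0 st.1 st.2.2.2 =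
      order.map (fun c => ([] : List Int) ++ posOf s.toList 0 c) := by
    rw [hsi]
    exact loop2_spec (fun c => (t.toList.count c : Int)) s.toList 0 st.1 order _
      (nodup_dedup_chars _) (by intro c; rw [hget c])
  refine Prod.ext ?_ ?_
  · show aLoop2 s.toList 0 st.1 st.2.2.2 = _
    rw [h2]
    apply List.map_congr_left
    intro c _
    rw [posOf_eq_filterMap]
    simp
  · show st.2.1.map (fun c => ((st.1.get? c).map (·.2)).getD 0) = _
    rw [hsync]
    apply List.map_congr_left
    intro c hcm
    rw [hget c]
    simp only [hcm, if_true, Option.map_some, Option.getD_some, count_single]
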